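-- pv_equiv track=rewrite | github.com/Domagoj2002/IMPLEMENTACIJA-SKRIVENIH-MARKOVLJEVIH-MODELA-U-DOMENSKOJ-KLASIFIKACIJI-PROTEINSKIH-SEKVENCI | main.py | correct_insert_indices
-- ===== SOURCE A (Python) =====
-- def correct_insert_indices(temp):
--     corrected = temp.copy()
--     for i, state in enumerate(temp):
--         if state.startswith('M'):
--             m_idx = int(state[1:])
--             for j in range(i+1, len(temp)):
--                 if corrected[j].startswith('I'):
--                     i_idx = int(corrected[j][1:])
--                     if i_idx < m_idx:
--                         corrected[j] = f'I{m_idx}'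
--     return corrected
-- ===== SOURCE B (Python) =====
-- def correct_insert_indices(temp):
--     result = []
--     best = None
--     for state in temp:
--         if state.startswith('M'):
--             m = int(state[1:])
--             if best is None or m > best:
--                 best = m
--             result.append(state)
--         elif state.startswith('I') and best is not None and int(state[1:]) < best:
--             result.append(f'I{best}')
--         else:
--             result.append(state)
--     return result
-- ===== Notes on version B (the rewrite author's own statement) =====
-- stated objective: alternative
-- what changed: Replaces A's nested loops (for every M state, rescan and rewrite all following I states) by a single left-to-right pass that tracks the running maximum M index and rewrites each I state at most once.
import Mathlib
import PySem

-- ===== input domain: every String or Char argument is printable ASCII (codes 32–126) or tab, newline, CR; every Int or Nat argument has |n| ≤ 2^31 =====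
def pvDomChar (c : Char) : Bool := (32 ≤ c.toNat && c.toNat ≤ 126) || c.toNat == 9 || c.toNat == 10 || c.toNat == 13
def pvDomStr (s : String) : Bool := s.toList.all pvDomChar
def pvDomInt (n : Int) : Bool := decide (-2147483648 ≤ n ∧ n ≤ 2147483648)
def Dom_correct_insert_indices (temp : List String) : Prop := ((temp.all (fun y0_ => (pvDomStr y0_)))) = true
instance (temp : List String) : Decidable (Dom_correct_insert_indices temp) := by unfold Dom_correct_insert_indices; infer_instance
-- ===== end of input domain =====

-- B replaces A's nested "for every M state, rescan every following I state" loops by a single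
-- left-to-right pass tracking the running maximum M index (objective: alternative algorithm).

-- shared literal helpers: `int(s[1:])` and the f-string `f'I{n}'`, used by both ports and Pre_
def pvIntTail (s : String) : Option Int := PySem.Int.ofStr? (PySem.Str.slice s (some 1) none)
def pvMkI (n : Int) : String := PySem.Str.join "" ["I", PySem.Int.toStr n]

-- ===== PORT A =====
-- body of A's inner `for j in range(i+1, len(temp))` loop
def pvInnerA (m_idx : Int) (corrected : List String) (j : Int) : List String :=
  if PySem.Str.startswith (PySem.List.pyGetD corrected j "") "I" then
    match pvIntTail (PySem.List.pyGetD corrected j "") with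
    | none => corrected          -- `int` raises ValueError here; excluded by Pre_
    | some i_idx =>
      if i_idx < m_idx then corrected.set j.toNat (pvMkI m_idx) else corrected
  else corrected

-- body of A's outer `for i, state in enumerate(temp)` loop (n = len(temp))
def pvOuterA (n : Int) (corrected : List String) (p : Int × String) : List String :=
  if PySem.Str.startswith p.2 "M" then
    match pvIntTail p.2 with
    | none => corrected          -- `int` raises ValueError here; excluded by Pre_
    | some m_idx => (PySem.List.pyRange (p.1 + 1) n).foldl (pvInnerA m_idx) corrected
  else corrected

def correct_insert_indices (temp : List String) : List String :=
  (PySem.List.enumerate temp).foldl (pvOuterA (temp.length : Int)) temp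

-- ===== PORT B =====
-- body of B's single `for state in temp` loop; the state is (result, best)
def pvStepB (acc : List String × Option Int) (state : String) : List String × Option Int :=
  if PySem.Str.startswith state "M" then
    match pvIntTail state with
    | none => (acc.1 ++ [state], acc.2)      -- `int` raises ValueError here; excluded by Pre_
    | some m =>
      match acc.2 with
      | none => (acc.1 ++ [state], some m)
      | some b => (acc.1 ++ [state], if m > b then some m else some b)
  else if PySem.Str.startswith state "I" then
    match acc.2 with
    | none => (acc.1 ++ [state], acc.2)
    | some b =>
      match pvIntTail state with
      | none => (acc.1 ++ [state], acc.2)    -- `int` raises ValueError here; excluded by Pre_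
      | some v =>
        if v < b then (acc.1 ++ [pvMkI b], acc.2) else (acc.1 ++ [state], acc.2)
  else (acc.1 ++ [state], acc.2)

def correct_insert_indices_alt (temp : List String) : List String :=
  (temp.foldl pvStepB ([], none)).1

-- ===== PRECONDITION & SPEC =====
-- Pre_ excludes exactly the ValueError inputs: an 'M…' state with a non-int-parseable tail, or an
-- 'I…' state with a non-int-parseable tail that has some 'M…' state before it.  The `.bind`
-- conjunct merely records int(str(v)) == v for each M state's value v; it is true for every input
-- (CPython round-trip) and excludes nothing — it is carried only because PySem exposes no
-- round-trip lemma for its (private) digit parser, and the proof needs that fact.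
def Pre_correct_insert_indices (temp : List String) : Prop :=
  (∀ s ∈ temp, PySem.Str.startswith s "M" = true →
      (pvIntTail s).isSome = true ∧
      (pvIntTail s).bind (fun v => PySem.Int.ofStr? (PySem.Int.toStr v)) = pvIntTail s) ∧
  (∀ p ∈ temp.zipIdx, PySem.Str.startswith p.1 "I" = true →
      (∃ q ∈ temp.zipIdx, q.2 < p.2 ∧ PySem.Str.startswith q.1 "M" = true) →
      (pvIntTail p.1).isSome = true)

instance (temp : List String) : Decidable (Pre_correct_insert_indices temp) := by
  unfold Pre_correct_insert_indices; infer_instance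

def pvWitness_correct_insert_indices : List String := ["M1", "I0", "I5", "M3", "I2"]

def Spec_correct_insert_indices (temp : List String) (out : List String) : Prop :=
  out = correct_insert_indices_alt temp
instance (temp : List String) (out : List String) : Decidable (Spec_correct_insert_indices temp out) := by
  unfold Spec_correct_insert_indices; infer_instance

-- ===== CLAIM (what is proved, stated in full; the proofs are below) =====
def Claim_equal_correct_insert_indices : Prop :=
  ∀ (temp : List String), Dom_correct_insert_indices temp →
    Pre_correct_insert_indices temp →
    Spec_correct_insert_indices temp (correct_insert_indices temp)

-- ===== LEMMAS AND PROOFS =====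

-- the current best M index, as both programs update it
def pvBump (b? : Option Int) (m : Int) : Option Int :=
  match b? with
  | none => some m
  | some b => if m > b then some m else some b

-- what both programs do to one state string, given the best preceding M index
def pvUpd (b? : Option Int) (s : String) : String :=
  match b? with
  | none => s
  | some b =>
    if PySem.Str.startswith s "I" then
      match pvIntTail s with
      | none => s
      | some v => if v < b then pvMkI b else s
    else s

-- the common specification both ports are reduced to
def pvSpecGo (b? : Option Int) : List String → List String
  | [] => []
  | s :: rest =>
    if PySem.Str.startswith s "M" then
      match pvIntTail s with
      | none => s :: pvSpecGo b? rest
      | some m => s :: pvSpecGo (pvBump b? m) rest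
    else pvUpd b? s :: pvSpecGo b? rest

theorem pvSpecGo_cons (b? : Option Int) (s : String) (rest : List String) :
    pvSpecGo b? (s :: rest) =
      (if PySem.Str.startswith s "M" then
        (match pvIntTail s with
         | none => s :: pvSpecGo b? rest
         | some m => s :: pvSpecGo (pvBump b? m) rest)
      else pvUpd b? s :: pvSpecGo b? rest) := rfl

theorem pvOuterA_M_some {m : Int} (n : Int) (c : List String) (p : Int × String)
    (hM : PySem.Str.startswith p.2 "M" = true) (hv : pvIntTail p.2 = some m) :
    pvOuterA n c p = (PySem.List.pyRange (p.1 + 1) n).foldl (pvInnerA m) c := by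
  unfold pvOuterA; rw [hM, hv, if_pos rfl]

theorem pvOuterA_M_none (n : Int) (c : List String) (p : Int × String)
    (hM : PySem.Str.startswith p.2 "M" = true) (hv : pvIntTail p.2 = none) :
    pvOuterA n c p = c := by
  unfold pvOuterA; rw [hM, hv, if_pos rfl]

theorem pvOuterA_notM (n : Int) (c : List String) (p : Int × String)
    (hM : PySem.Str.startswith p.2 "M" = false) :
    pvOuterA n c p = c := by
  unfold pvOuterA; rw [hM, if_neg (by simp)]

-- "the stored best value parses back from its decimal form" (vacuously true; from Pre_)
def pvRT (b? : Option Int) : Prop :=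
  ∀ b, b? = some b → PySem.Int.ofStr? (PySem.Int.toStr b) = some b

theorem pv_mkI_toList (b : Int) :
    (pvMkI b).toList = 'I' :: PySem.Int.toChars b := by
  unfold pvMkI
  simp [PySem.Str.toList_join, PySem.Chars.join, PySem.Int.toList_toStr, List.intercalate,
    List.intersperse]

theorem pv_not_M_of_I (s : String) (h : PySem.Str.startswith s "I" = true) :
    PySem.Str.startswith s "M" = false := by
  rw [PySem.Str.startswith_eq] at *
  rw [PySem.Chars.startswith_iff] at h
  by_contra hM
  rw [Bool.not_eq_false, PySem.Chars.startswith_iff] at hM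
  rw [show "I".toList = ['I'] from rfl] at h
  rw [show "M".toList = ['M'] from rfl] at hM
  obtain ⟨t1, h1⟩ := h
  obtain ⟨t2, h2⟩ := hM
  rw [← h2] at h1
  simp at h1

theorem pv_not_I_of_M (s : String) (h : PySem.Str.startswith s "M" = true) :
    PySem.Str.startswith s "I" = false := by
  by_contra hI
  rw [Bool.not_eq_false] at hI
  rw [pv_not_M_of_I s hI] at h
  cases h

theorem pvMkI_startsI (b : Int) : PySem.Str.startswith (pvMkI b) "I" = true := by
  rw [PySem.Str.startswith_eq, PySem.Chars.startswith_iff, pv_mkI_toList]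
  exact ⟨_, rfl⟩

theorem pvIntTail_mkI (b : Int) :
    pvIntTail (pvMkI b) = PySem.Int.ofStr? (PySem.Int.toStr b) := by
  unfold pvIntTail
  rw [PySem.Int.ofStr?.eq_1, PySem.Int.ofStr?.eq_1, PySem.Str.toList_slice,
    PySem.Chars.slice_eq_listSlice, pv_mkI_toList]
  simp [PySem.List.slice_from, PySem.Int.toList_toStr]

theorem pvUpd_none (s : String) : pvUpd none s = s := rfl

theorem pvUpd_of_M (b? : Option Int) (s : String)
    (h : PySem.Str.startswith s "M" = true) : pvUpd b? s = s := by
  unfold pvUpd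
  cases b? with
  | none => rfl
  | some b => rw [pv_not_I_of_M s h]; simp

theorem pvBump_none (m : Int) : pvBump none m = some m := rfl
theorem pvBump_some (b m : Int) : pvBump (some b) m = if m > b then some m else some b := rfl
theorem pvUpd_some (b : Int) (s : String) :
    pvUpd (some b) s =
      if PySem.Str.startswith s "I" then
        (match pvIntTail s with
         | none => s
         | some v => if v < b then pvMkI b else s)
      else s := rfl

theorem pvRT_bump (b? : Option Int) (m : Int) (hb : pvRT b?)
    (hm : PySem.Int.ofStr? (PySem.Int.toStr m) = some m) : pvRT (pvBump b? m) := by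
  intro b hb'
  cases b? with
  | none => rw [pvBump_none] at hb'; cases hb'; exact hm
  | some b0 =>
    rw [pvBump_some] at hb'
    by_cases hmb : m > b0
    · rw [if_pos hmb] at hb'; cases hb'; exact hm
    · rw [if_neg hmb] at hb'; cases hb'; exact hb _ rfl

theorem pvUpd_upd (m : Int) (b? : Option Int) (s : String) (hb : pvRT b?) :
    pvUpd (some m) (pvUpd b? s) = pvUpd (pvBump b? m) s := by
  cases b? with
  | none => rfl
  | some b =>
    have hrt : pvIntTail (pvMkI b) = some b := by
      rw [pvIntTail_mkI]; exact hb b rfl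
    rw [pvBump_some]
    by_cases hI : PySem.Str.startswith s "I" = true
    · cases hv : pvIntTail s with
      | none =>
        have e : ∀ c : Int, pvUpd (some c) s = s := by
          intro c; rw [pvUpd_some]; simp only [hI, hv, if_true]
        rw [e, e]
        by_cases hmb : m > b
        · rw [if_pos hmb, e]
        · rw [if_neg hmb, e]
      | some v =>
        by_cases hvb : v < b
        · have e1 : pvUpd (some b) s = pvMkI b := by
            rw [pvUpd_some]; simp only [hI, hv, if_true, if_pos hvb]
          have e2 : pvUpd (some m) (pvMkI b) = if b < m then pvMkI m else pvMkI b := by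
            rw [pvUpd_some]; simp only [pvMkI_startsI, hrt, if_true]
          rw [e1, e2]
          by_cases hmb : m > b
          · rw [if_pos hmb, if_pos hmb, pvUpd_some]
            simp only [hI, hv, if_true]
            rw [if_pos (by omega : v < m)]
          · rw [if_neg hmb, if_neg hmb, pvUpd_some]
            simp only [hI, hv, if_true]
            rw [if_pos hvb]
        · have e1 : pvUpd (some b) s = s := by
            rw [pvUpd_some]; simp only [hI, hv, if_true, if_neg hvb]
          rw [e1]
          by_cases hmb : m > b
          · rw [if_pos hmb]
          · rw [if_neg hmb, pvUpd_some, pvUpd_some]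
            simp only [hI, hv, if_true]
            rw [if_neg hvb, if_neg (by omega : ¬ v < m)]
    · rw [Bool.not_eq_true] at hI
      have e : ∀ c : Int, pvUpd (some c) s = s := by
        intro c; rw [pvUpd_some]; simp only [hI]; simp
      rw [e, e]
      by_cases hmb : m > b
      · rw [if_pos hmb, e]
      · rw [if_neg hmb, e]

theorem pv_inner_fold (m : Int) :
    ∀ (suf pre : List String),
      (PySem.List.pyRange (pre.length : Int) ((pre.length + suf.length : Nat) : Int)).foldl
          (pvInnerA m) (pre ++ suf)
        = pre ++ suf.map (pvUpd (some m)) := by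
  intro suf
  induction suf with
  | nil =>
    intro pre
    simp [PySem.List.pyRange]
  | cons s suf' ih =>
    intro pre
    have hlt : (pre.length : Int) < ((pre.length + (s :: suf').length : Nat) : Int) := by
      simp
    rw [PySem.List.pyRange_one_cons hlt, List.foldl_cons]
    have hget : PySem.List.pyGetD (pre ++ s :: suf') ((pre.length : Nat) : Int) "" = s := by
      rw [PySem.List.pyGetD_natCast]
      simp [List.getD_eq_getElem?_getD]
    have hstep : pvInnerA m (pre ++ s :: suf') ((pre.length : Nat) : Int)
        = pre ++ pvUpd (some m) s :: suf' := by
      unfold pvInnerA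
      rw [hget]
      by_cases hI : PySem.Str.startswith s "I" = true
      · cases hv : pvIntTail s with
        | none =>
          simp only [hI, if_true]
          rw [pvUpd_some]; simp only [hI, hv, if_true]
        | some v =>
          by_cases hvm : v < m
          · simp only [hI, if_true, if_pos hvm]
            rw [pvUpd_some]; simp only [hI, hv, if_true, if_pos hvm]
            simp
          · simp only [hI, if_true, if_neg hvm]
            rw [pvUpd_some]; simp only [hI, hv, if_true, if_neg hvm]
      · rw [Bool.not_eq_true] at hI
        simp only [hI, Bool.false_eq_true, if_false]
        rw [pvUpd_some]; simp only [hI, Bool.false_eq_true, if_false]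
    rw [hstep]
    have e0 : pre ++ pvUpd (some m) s :: suf' = (pre ++ [pvUpd (some m) s]) ++ suf' := by simp
    have e1 : ((pre.length : Nat) : Int) + 1 = (((pre ++ [pvUpd (some m) s]).length : Nat) : Int) := by
      simp
    have e2 : ((pre.length + (s :: suf').length : Nat) : Int)
        = (((pre ++ [pvUpd (some m) s]).length + suf'.length : Nat) : Int) := by
      push_cast; simp [List.length_cons]; omega
    rw [e0, e1, e2, ih]
    simp

theorem pv_outer_fold (N : Int) :
    ∀ (rest pre : List String) (b? : Option Int),
      N = ((pre.length + rest.length : Nat) : Int) →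
      pvRT b? →
      (∀ s ∈ rest, PySem.Str.startswith s "M" = true →
        ∀ m, pvIntTail s = some m → PySem.Int.ofStr? (PySem.Int.toStr m) = some m) →
      (PySem.List.enumerate rest ((pre.length : Nat) : Int)).foldl (pvOuterA N)
          (pre ++ rest.map (pvUpd b?))
        = pre ++ pvSpecGo b? rest := by
  intro rest
  induction rest with
  | nil =>
    intro pre b? _ _ _
    simp [pvSpecGo, PySem.List.enumerate_nil]
  | cons s rest' ih =>
    intro pre b? hN hrt hres
    rw [PySem.List.enumerate_cons, List.foldl_cons, List.map_cons]
    by_cases hM : PySem.Str.startswith s "M" = true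
    · rw [pvUpd_of_M b? s hM]
      cases hv : pvIntTail s with
      | none =>
        rw [pvOuterA_M_none N _ (((pre.length : Nat) : Int), s) hM hv]
        have e0 : pre ++ s :: List.map (pvUpd b?) rest'
            = (pre ++ [s]) ++ List.map (pvUpd b?) rest' := by simp
        have e1 : ((pre.length : Nat) : Int) + 1 = (((pre ++ [s]).length : Nat) : Int) := by
          simp
        rw [e0, e1, ih (pre ++ [s]) b? (by rw [hN]; push_cast; simp; omega) hrt
          (fun t ht => hres t (List.mem_cons_of_mem s ht))]
        have hSpec : pvSpecGo b? (s :: rest') = s :: pvSpecGo b? rest' := by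
          rw [pvSpecGo_cons, hM, hv, if_pos rfl]
        rw [hSpec]; simp
      | some m =>
        have hm := hres s List.mem_cons_self hM m hv
        rw [pvOuterA_M_some N _ (((pre.length : Nat) : Int), s) hM hv]
        have e0 : pre ++ s :: List.map (pvUpd b?) rest'
            = (pre ++ [s]) ++ List.map (pvUpd b?) rest' := by simp
        have e1 : ((pre.length : Nat) : Int) + 1 = (((pre ++ [s]).length : Nat) : Int) := by
          simp
        have e2 : N = (((pre ++ [s]).length + (List.map (pvUpd b?) rest').length : Nat) : Int) := by
          rw [hN]; push_cast; simp; omega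
        rw [e0, show (((pre.length : Nat) : Int), s).1 = ((pre.length : Nat) : Int) from rfl,
          e1]
        rw [show ((((pre ++ [s]).length : Nat) : Int)) = (((pre ++ [s]).length : Nat) : Int) from rfl]
        rw [e2, pv_inner_fold m (List.map (pvUpd b?) rest') (pre ++ [s])]
        rw [List.map_map]
        have ecomp : (pvUpd (some m) ∘ pvUpd b?) = pvUpd (pvBump b? m) := by
          funext t; exact pvUpd_upd m b? t hrt
        rw [ecomp, ← e2]
        have e3 : N = (((pre ++ [s]).length + rest'.length : Nat) : Int) := by
          rw [hN]; push_cast; simp; omega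
        rw [ih (pre ++ [s]) (pvBump b? m) e3 (pvRT_bump b? m hrt hm)
          (fun t ht => hres t (List.mem_cons_of_mem s ht))]
        have hSpec : pvSpecGo b? (s :: rest') = s :: pvSpecGo (pvBump b? m) rest' := by
          rw [pvSpecGo_cons, hM, hv, if_pos rfl]
        rw [hSpec]; simp
    · rw [Bool.not_eq_true] at hM
      rw [pvOuterA_notM N _ (((pre.length : Nat) : Int), s) hM]
      have e0 : pre ++ pvUpd b? s :: List.map (pvUpd b?) rest'
          = (pre ++ [pvUpd b? s]) ++ List.map (pvUpd b?) rest' := by simp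
      have e1 : ((pre.length : Nat) : Int) + 1 = (((pre ++ [pvUpd b? s]).length : Nat) : Int) := by
        simp
      rw [e0, e1, ih (pre ++ [pvUpd b? s]) b? (by rw [hN]; push_cast; simp; omega) hrt
        (fun t ht => hres t (List.mem_cons_of_mem s ht))]
      have hSpec : pvSpecGo b? (s :: rest') = pvUpd b? s :: pvSpecGo b? rest' := by
        rw [pvSpecGo_cons, hM, if_neg (by simp)]
      rw [hSpec]; simp

theorem pv_A_eq_spec (temp : List String)
    (h : ∀ s ∈ temp, PySem.Str.startswith s "M" = true →
      ∀ m, pvIntTail s = some m → PySem.Int.ofStr? (PySem.Int.toStr m) = some m) :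
    correct_insert_indices temp = pvSpecGo none temp := by
  unfold correct_insert_indices
  have h0 := pv_outer_fold (temp.length : Int) temp [] none (by simp) (by intro b hb; cases hb) h
  simp only [List.length_nil, Nat.cast_zero, List.nil_append] at h0
  rw [show pvUpd none = id from funext pvUpd_none, List.map_id] at h0
  exact h0

theorem pv_B_fold :
    ∀ (l : List String) (acc : List String) (b? : Option Int),
      (l.foldl pvStepB (acc, b?)).1 = acc ++ pvSpecGo b? l := by
  intro l
  induction l with
  | nil => intro acc b?; simp [pvSpecGo]
  | cons s rest ih =>
    intro acc b?
    rw [List.foldl_cons]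
    by_cases hM : PySem.Str.startswith s "M" = true
    · cases hv : pvIntTail s with
      | none =>
        have hstep : pvStepB (acc, b?) s = (acc ++ [s], b?) := by
          unfold pvStepB; rw [hM, hv, if_pos rfl]
        have hSpec : pvSpecGo b? (s :: rest) = s :: pvSpecGo b? rest := by
          rw [pvSpecGo_cons, hM, hv, if_pos rfl]
        rw [hstep, ih, hSpec]; simp
      | some m =>
        have hstep : pvStepB (acc, b?) s = (acc ++ [s], pvBump b? m) := by
          unfold pvStepB; rw [hM, hv, if_pos rfl]
          cases b? <;> rfl
        have hSpec : pvSpecGo b? (s :: rest) = s :: pvSpecGo (pvBump b? m) rest := by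
          rw [pvSpecGo_cons, hM, hv, if_pos rfl]
        rw [hstep, ih, hSpec]; simp
    · rw [Bool.not_eq_true] at hM
      have hSpec : pvSpecGo b? (s :: rest) = pvUpd b? s :: pvSpecGo b? rest := by
        rw [pvSpecGo_cons, hM, if_neg (by simp)]
      rw [hSpec]
      by_cases hI : PySem.Str.startswith s "I" = true
      · cases b? with
        | none =>
          have hstep : pvStepB (acc, none) s = (acc ++ [s], none) := by
            unfold pvStepB; rw [hM, if_neg (by simp), hI, if_pos rfl]
          rw [hstep, ih, pvUpd_none]; simp
        | some b =>
          cases hv : pvIntTail s with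
          | none =>
            have hstep : pvStepB (acc, some b) s = (acc ++ [s], some b) := by
              unfold pvStepB; rw [hM, if_neg (by simp), hI, if_pos rfl, hv]
            have hupd : pvUpd (some b) s = s := by
              rw [pvUpd_some]; simp only [hI, hv, if_true]
            rw [hstep, ih, hupd]; simp
          | some v =>
            by_cases hvb : v < b
            · have hstep : pvStepB (acc, some b) s = (acc ++ [pvMkI b], some b) := by
                unfold pvStepB; rw [hM, if_neg (by simp), hI, if_pos rfl, hv]
                show (if v < b then (acc ++ [pvMkI b], some b) else (acc ++ [s], some b))
                    = (acc ++ [pvMkI b], some b)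
                rw [if_pos hvb]
              have hupd : pvUpd (some b) s = pvMkI b := by
                rw [pvUpd_some]; simp only [hI, hv, if_true, if_pos hvb]
              rw [hstep, ih, hupd]; simp
            · have hstep : pvStepB (acc, some b) s = (acc ++ [s], some b) := by
                unfold pvStepB; rw [hM, if_neg (by simp), hI, if_pos rfl, hv]
                show (if v < b then (acc ++ [pvMkI b], some b) else (acc ++ [s], some b))
                    = (acc ++ [s], some b)
                rw [if_neg hvb]
              have hupd : pvUpd (some b) s = s := by
                rw [pvUpd_some]; simp only [hI, hv, if_true, if_neg hvb]
              rw [hstep, ih, hupd]; simp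
      · rw [Bool.not_eq_true] at hI
        have hstep : pvStepB (acc, b?) s = (acc ++ [s], b?) := by
          unfold pvStepB; rw [hM, if_neg (by simp), hI, if_neg (by simp)]
        have hupd : pvUpd b? s = s := by
          cases b? with
          | none => rfl
          | some b => rw [pvUpd_some]; simp only [hI, Bool.false_eq_true, if_false]
        rw [hstep, ih, hupd]; simp

theorem pv_B_eq_spec (temp : List String) :
    correct_insert_indices_alt temp = pvSpecGo none temp := by
  unfold correct_insert_indices_alt
  rw [pv_B_fold temp [] none]
  simp

-- ===== VERDICT (by name: the statement is the Claim_ definition above) =====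
theorem correct_insert_indices_spec : Claim_equal_correct_insert_indices := by
  intro temp _hDom hPre
  unfold Spec_correct_insert_indices
  rw [pv_B_eq_spec, pv_A_eq_spec]
  intro s hs hM m hm
  have h := (hPre.1 s hs hM).2
  rw [hm] at h
  simpa using h
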